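-- pv_equiv track=rewrite | github.com/ShuvalovAnthony/ege | 19_21/845.py | f
-- ===== SOURCE A (Python) =====
-- def f(s, step=1): # 1p 2v 3p 4v 5p
--     if s >= 36 and s <= 60:
--         if step == 4: return 1
--         else: return 0
--     elif s >= 36 and s > 60:
--         if step == 3: return 1
--         else: return 0
--
--     if step%2 != 0:
--         return f(s + 1, step + 1) or \
--             f(s*2, step + 1) or \
--             f(s*3, step + 1)
--
--     return f(s + 1, step + 1) and \
--            f(s*2, step + 1) and \
--            f(s*3, step + 1)
-- ===== SOURCE B (Python) =====
-- def f(s, step=1):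
--     # Closed form: the game is solved once and for all.  A score is only
--     # awarded at a terminal position (s >= 36), at step 4 if 36 <= s <= 60
--     # and at step 3 if s > 60; hence below 36 only steps 1..3 can still win,
--     # and solving that depth-bounded alternating game yields fixed winning
--     # sets, looked up directly.
--     if s >= 36:
--         return int(step == (4 if s <= 60 else 3))
--     if step == 3:
--         return int(12 <= s <= 30 or s == 35)
--     if step == 2:
--         return int(s == 34)
--     if step == 1:
--         return int(s == 17 or s == 33)
--     return 0
-- ===== Notes on version B (the rewrite author's own statement) =====
-- stated objective: simpler
-- what changed: B replaces A's or/and game-tree recursion by a closed form: terminals are scored by the step-3/step-4 rule directly and every position below 36 is answered by a constant lookup in the solved winning sets (step 3: 12..30 or 35; step 2: 34; step 1: 17 or 33; otherwise 0), proved equal to the recursion in Lean.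
-- crash fix: A raises RecursionError on every s <= -2 and on s = -1 with odd step; B returns 0 there. — e.g. on f(-5, 1): A raises RecursionError, B returns 0
import Mathlib
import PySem

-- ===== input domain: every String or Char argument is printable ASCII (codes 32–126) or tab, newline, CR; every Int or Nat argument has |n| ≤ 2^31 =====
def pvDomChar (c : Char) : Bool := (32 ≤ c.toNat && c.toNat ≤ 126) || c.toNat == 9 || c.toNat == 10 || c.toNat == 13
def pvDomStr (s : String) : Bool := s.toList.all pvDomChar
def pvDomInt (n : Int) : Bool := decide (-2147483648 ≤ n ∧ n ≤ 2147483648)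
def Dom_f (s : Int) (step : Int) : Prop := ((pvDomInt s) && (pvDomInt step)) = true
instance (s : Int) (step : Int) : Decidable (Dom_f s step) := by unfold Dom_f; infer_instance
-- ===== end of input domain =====

-- B answers by closed form (terminal scoring rule plus the solved winning sets below 36)
-- instead of A's or/and game-tree recursion; A's recursion does not terminate for every Int
-- input (s ≤ -2 always overflows the stack), so its port uses a fuel counter; fuel 100 is
-- proved sufficient on Pre_f.

-- ===== PORT A =====
def fA : Nat → Int → Int → Option Int
  | 0, _, _ => none
  | n+1, s, step =>
    if 36 ≤ s ∧ s ≤ 60 then some (if step = 4 then 1 else 0)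
    else if 36 ≤ s ∧ 60 < s then some (if step = 3 then 1 else 0)
    else if PySem.Int.mod step 2 ≠ 0 then
      -- Python `x or y or z` on ints: first truthy operand, else the last
      match fA n (s+1) (step+1) with
      | none => none
      | some a =>
        if a ≠ 0 then some a else
          match fA n (s*2) (step+1) with
          | none => none
          | some b => if b ≠ 0 then some b else fA n (s*3) (step+1)
    else
      -- Python `x and y and z` on ints: first falsy operand, else the last
      match fA n (s+1) (step+1) with
      | none => none
      | some a =>
        if a = 0 then some a else
          match fA n (s*2) (step+1) with
          | none => none
          | some b => if b = 0 then some b else fA n (s*3) (step+1)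

def f (s : Int) (step : Int) : Int := (fA 100 s step).getD 0

-- ===== PORT B =====
def f_alt (s : Int) (step : Int) : Int :=
  if 36 ≤ s then (if step = (if s ≤ 60 then 4 else 3) then 1 else 0)
  else if step = 3 then (if (12 ≤ s ∧ s ≤ 30) ∨ s = 35 then 1 else 0)
  else if step = 2 then (if s = 34 then 1 else 0)
  else if step = 1 then (if s = 17 ∨ s = 33 then 1 else 0)
  else 0

-- ===== PRECONDITION & SPEC =====
-- Pre_f excludes exactly the inputs on which Python A raises RecursionError:
-- every s ≤ -2, and s = -1 with odd step.
def Pre_f (s : Int) (step : Int) : Prop := 0 ≤ s ∨ (s = -1 ∧ PySem.Int.mod step 2 = 0)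
instance (s : Int) (step : Int) : Decidable (Pre_f s step) := by unfold Pre_f; infer_instance
def pvWitness_f : Int × Int := (5, 1)

-- A raises RecursionError on every s ≤ -2 and on s = -1 with odd step; B returns 0 there.
def Raises_f (s : Int) (step : Int) : Prop := s ≤ -2 ∨ (s = -1 ∧ PySem.Int.mod step 2 = 1)
instance (s : Int) (step : Int) : Decidable (Raises_f s step) := by unfold Raises_f; infer_instance
def pvRaiseWitness_f : Int × Int := (-5, 1)
def pvRaiseWitnessOut_f : Int := 0

def Spec_f (s : Int) (step : Int) (out : Int) : Prop := out = f_alt s step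
instance (s : Int) (step : Int) (out : Int) : Decidable (Spec_f s step out) := by unfold Spec_f; infer_instance

-- ===== CLAIM (what is proved, stated in full; the proofs are below) =====
def Claim_equal_f : Prop := ∀ (s : Int) (step : Int), Dom_f s step → Pre_f s step → Spec_f s step (f s step)
def Claim_raises_f : Prop := (∀ (s : Int) (step : Int), Dom_f s step → Raises_f s step → ¬ Pre_f s step) ∧ (Dom_f (pvRaiseWitness_f.1) (pvRaiseWitness_f.2) ∧ Raises_f (pvRaiseWitness_f.1) (pvRaiseWitness_f.2) ∧ f_alt (pvRaiseWitness_f.1) (pvRaiseWitness_f.2) = pvRaiseWitnessOut_f)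

-- ===== LEMMAS AND PROOFS =====

lemma pymod2 (t : Int) : PySem.Int.mod t 2 = t % 2 :=
  PySem.Int.mod_eq_emod_of_pos (by omega)

-- B is 0 on every sub-terminal position at a step outside 1..3
lemma f_alt_small_zero (s t : Int) (hs : s < 36) (ht : t ≤ 0 ∨ 4 ≤ t) :
    f_alt s t = 0 := by
  unfold f_alt; split_ifs <;> omega

-- B is 0 everywhere at a step outside 1..4
lemma f_alt_any_zero (s t : Int) (ht : t ≤ 0 ∨ 5 ≤ t) : f_alt s t = 0 := by
  unfold f_alt; split_ifs <;> omega

lemma f_alt_nonpos (s t : Int) (hs : s ≤ 0) : f_alt s t = 0 := by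
  unfold f_alt; split_ifs <;> omega

lemma f_alt_one (u : Int) : f_alt 1 u = 0 := by
  unfold f_alt; split_ifs <;> omega

-- the short-circuit combine of B's child values equals B's closed form
lemma mid_eq (s t : Int) (h1 : 1 ≤ s) (h2 : s ≤ 35) :
    (if PySem.Int.mod t 2 ≠ 0 then
       (if f_alt (s+1) (t+1) ≠ 0 then f_alt (s+1) (t+1)
        else if f_alt (s*2) (t+1) ≠ 0 then f_alt (s*2) (t+1)
        else f_alt (s*3) (t+1))
     else
       (if f_alt (s+1) (t+1) = 0 then f_alt (s+1) (t+1)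
        else if f_alt (s*2) (t+1) = 0 then f_alt (s*2) (t+1)
        else f_alt (s*3) (t+1)))
    = f_alt s t := by
  by_cases hout : t ≤ -1 ∨ 4 ≤ t
  · have c1 := f_alt_any_zero (s+1) (t+1) (by omega)
    have c2 := f_alt_any_zero (s*2) (t+1) (by omega)
    have c3 := f_alt_any_zero (s*3) (t+1) (by omega)
    have hz := f_alt_small_zero s t (by omega) (by omega)
    simp [c1, c2, c3, hz]
  · have h0 : 0 ≤ t := by omega
    have h3 : t ≤ 3 := by omega
    interval_cases t <;> interval_cases s <;> decide

-- A's fuel recursion computes B's closed form on the positive region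
lemma fA_pos : ∀ (n : Nat) (s t : Int), 1 ≤ s → (36 - s).toNat < n →
    fA n s t = some (f_alt s t) := by
  intro n
  induction n with
  | zero => intro s t _ h; omega
  | succ n ih =>
    intro s t hs hn
    by_cases h1 : 36 ≤ s ∧ s ≤ 60
    · unfold f_alt
      simp [fA, h1]
    · by_cases h2 : 36 ≤ s ∧ 60 < s
      · unfold f_alt
        have : ¬ s ≤ 60 := by omega
        simp [fA, h2, this]
      · have hs36 : s < 36 := by omega
        have hc1 : fA n (s+1) (t+1) = some (f_alt (s+1) (t+1)) :=
          ih (s+1) (t+1) (by omega) (by omega)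
        have hc2 : fA n (s*2) (t+1) = some (f_alt (s*2) (t+1)) :=
          ih (s*2) (t+1) (by omega) (by omega)
        have hc3 : fA n (s*3) (t+1) = some (f_alt (s*3) (t+1)) :=
          ih (s*3) (t+1) (by omega) (by omega)
        have hmid := mid_eq s t (by omega) (by omega)
        simp only [fA, h1, h2, if_false]
        rw [hc1, hc2, hc3, ← hmid]
        by_cases hm : PySem.Int.mod t 2 ≠ 0 <;> simp only [hm, if_false] <;>
          split_ifs <;> simp_all

-- A at s = 0: the short-circuit chains terminate with value 0
lemma fA_zero_even (n : Nat) (t : Int) (he : t % 2 = 0) (hn : 37 ≤ n) :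
    fA n 0 t = some 0 := by
  obtain ⟨m, rfl⟩ : ∃ m, n = m + 1 := ⟨n - 1, by omega⟩
  have hc : fA m 1 (t+1) = some (f_alt 1 (t+1)) := fA_pos m 1 (t+1) (by omega) (by omega)
  have hno : ¬ (t % 2 = 1) := by omega
  simp only [fA]
  simp [hno, hc, f_alt_one]

lemma fA_zero_odd (n : Nat) (t : Int) (ho : t % 2 = 1) (hn : 38 ≤ n) :
    fA n 0 t = some 0 := by
  obtain ⟨m, rfl⟩ : ∃ m, n = m + 1 := ⟨n - 1, by omega⟩
  have hc : fA m 1 (t+1) = some (f_alt 1 (t+1)) := fA_pos m 1 (t+1) (by omega) (by omega)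
  have hb : fA m 0 (t+1) = some 0 := fA_zero_even m (t+1) (by omega) (by omega)
  simp only [fA]
  simp [ho, hc, f_alt_one, hb]

-- A at s = -1, even step: evaluates f(0, t+1) (odd), gets 0, short-circuits
lemma fA_neg_one (n : Nat) (t : Int) (he : t % 2 = 0) (hn : 39 ≤ n) :
    fA n (-1) t = some 0 := by
  obtain ⟨m, rfl⟩ : ∃ m, n = m + 1 := ⟨n - 1, by omega⟩
  have hb : fA m 0 (t+1) = some 0 := fA_zero_odd m (t+1) (by omega) (by omega)
  have hno : ¬ (t % 2 = 1) := by omega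
  simp only [fA]
  simp [hno, hb]

-- ===== VERDICT (by name: the statements are the Claim_ definitions above) =====
theorem f_spec : Claim_equal_f := by
  intro s t _ hpre
  unfold Spec_f f
  rcases hpre with hs | ⟨rfl, heven⟩
  · by_cases h1 : 1 ≤ s
    · rw [fA_pos 100 s t h1 (by omega)]; rfl
    · have hs0 : s = 0 := by omega
      subst hs0
      rcases Int.emod_two_eq_zero_or_one t with he | ho
      · rw [fA_zero_even 100 t he (by omega), f_alt_nonpos 0 t (by omega)]; rfl
      · rw [fA_zero_odd 100 t ho (by omega), f_alt_nonpos 0 t (by omega)]; rfl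
  · rw [pymod2] at heven
    rw [fA_neg_one 100 t heven (by omega), f_alt_nonpos (-1) t (by omega)]; rfl

theorem f_raises : Claim_raises_f := by
  unfold Claim_raises_f
  constructor
  · intro s t _ hr
    unfold Pre_f
    rcases hr with h | ⟨rfl, hodd⟩
    · exact fun hp => by rcases hp with h' | ⟨h', _⟩ <;> omega
    · exact fun hp => by rcases hp with h' | ⟨_, h'⟩ <;> omega
  · exact ⟨by decide, by decide, by decide⟩

-- self-check: the raise witness indeed lies outside Pre_f (via the first half of f_raises)
theorem f_raises_witness_ok : ¬ Pre_f (pvRaiseWitness_f.1) (pvRaiseWitness_f.2) :=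
  f_raises.1 pvRaiseWitness_f.1 pvRaiseWitness_f.2 (by decide) (by decide)
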